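-- pv_equiv track=rewrite | github.com/tcosmo/cdgp | cdgp/quadarithmetic.py | cross_word
-- ===== SOURCE A (Python) =====
-- def orderlex(l1, l2, n1, n2):
--     """ lexicographic order on infinite words, returns :
--     0 if the n1-th shift of l1^infty is smaller than the n2-th shift of l2^infty, 1 if it is larger, and 2 if the two words coincide
--     (this can be determined by looking only length(l1)+length(l2) letters since u^infty = v^infty iff uv = vu).
--     """
--     i = 0
--     while( (l1[(i+n1)%len(l1)] == l2[(i+n2)%len(l2)]) & (i <= (len(l1)+len(l2))) ):
--         i = i+1
--     if l1[(i+n1)%len(l1)] < l2[(i+n2)%len(l2)]: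
--         return 0
--     else:
--         if l1[(i+n1)%len(l1)] > l2[(i+n2)%len(l2)]:
--             return 1
--         else:
--             return 2
--
-- def cross_word(w1, w2):
--     """ The function cross computes the crossing number of l1 and l2 on the template.
--     It relies on the observation that a crossing occurs
--     when an arc coming from the left ear (the 0) goes to the right
--     of an arc coming from the right ear (the 1).
--     """
--     c = 0
--     for i in range(len(w1)):
--         for j in range(len(w2)):
--             if ( (w1[i] == 'L') & (w2[j] == 'R') & (orderlex(w1,w2,i+1,j+1) == 1) ):
--                 c = c+1
--             if ( (w1[i] == 'R') & (w2[j] == 'L') & (orderlex(w1,w2,i+1,j+1) == 0) ):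
--                 c = c+1
--     return c
-- ===== SOURCE B (Python) =====
-- def cross_word(w1, w2):
--     n1, n2 = len(w1), len(w2)
--     if n1 == 0 or n2 == 0:
--         return 0
--     L = n1 + n2 + 2
--     keys1 = [''.join(w1[(t + s) % n1] for t in range(L)) for s in range(n1)]
--     keys2 = [''.join(w2[(t + s) % n2] for t in range(L)) for s in range(n2)]
--     allk = sorted(set(keys1 + keys2))
--     rank = {k: i for i, k in enumerate(allk)}
--     r1 = [rank[k] for k in keys1]
--     r2 = [rank[k] for k in keys2]
--     c = 0
--     for i in range(n1):
--         a = r1[(i + 1) % n1]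
--         for j in range(n2):
--             if w1[i] == 'L':
--                 if w2[j] == 'R' and a > r2[(j + 1) % n2]:
--                     c += 1
--             elif w1[i] == 'R':
--                 if w2[j] == 'L' and a < r2[(j + 1) % n2]:
--                     c += 1
--     return c
-- ===== Notes on version B (the rewrite author's own statement) =====
-- stated objective: faster
-- what changed: B precomputes the length-(n1+n2+2) expansion of every cyclic shift of both words, sorts the distinct expansions once to assign each shift an integer rank, and replaces A's per-pair character-by-character orderlex loop by a single O(1) integer rank comparison.
import Mathlib
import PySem

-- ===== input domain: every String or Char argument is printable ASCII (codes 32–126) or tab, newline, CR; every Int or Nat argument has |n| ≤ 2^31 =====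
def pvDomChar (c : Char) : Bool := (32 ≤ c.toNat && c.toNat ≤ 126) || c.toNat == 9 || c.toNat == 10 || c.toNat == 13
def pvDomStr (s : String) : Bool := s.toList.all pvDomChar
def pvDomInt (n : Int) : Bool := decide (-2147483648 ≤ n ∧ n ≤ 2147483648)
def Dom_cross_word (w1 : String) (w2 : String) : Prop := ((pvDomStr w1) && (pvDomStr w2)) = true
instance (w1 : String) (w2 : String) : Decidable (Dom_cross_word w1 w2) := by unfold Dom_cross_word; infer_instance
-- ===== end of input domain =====

-- B replaces A's per-pair character-by-character comparison loop by precomputed ranks of all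
-- cyclic shifts (sort the expanded rotation keys once, compare ranks in O(1) per pair): faster.

-- ===== PORT A =====
-- l1[(i+n)%len(l1)] — the letter the orderlex loop reads (index is always in range since len > 0)
def olChar (l : List Char) (n : Int) (i : Nat) : Char :=
  PySem.List.pyGetD l (PySem.Int.mod ((i : Int) + n) (l.length : Int)) '?'

-- the 'while' of orderlex: returns the final value of i
def olLoop (l1 l2 : List Char) (a b : Int) (i : Nat) : Nat :=
  if h : olChar l1 a i = olChar l2 b i ∧ i ≤ l1.length + l2.length then
    olLoop l1 l2 a b (i + 1)
  else i
termination_by l1.length + l2.length + 1 - i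
decreasing_by omega

def orderlex (l1 l2 : List Char) (a b : Int) : Int :=
  let i := olLoop l1 l2 a b 0
  if olChar l1 a i < olChar l2 b i then 0
  else if olChar l2 b i < olChar l1 a i then 1
  else 2

def cross_word (w1 : String) (w2 : String) : Int :=
  let l1 := w1.toList
  let l2 := w2.toList
  (PySem.List.pyRange 0 (l1.length : Int) 1).foldl (fun c i =>
    (PySem.List.pyRange 0 (l2.length : Int) 1).foldl (fun c j =>
      let c1 := if PySem.List.pyGetD l1 i '?' = 'L' ∧ PySem.List.pyGetD l2 j '?' = 'R' ∧
                   orderlex l1 l2 (i + 1) (j + 1) = 1 then c + 1 else c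
      if PySem.List.pyGetD l1 i '?' = 'R' ∧ PySem.List.pyGetD l2 j '?' = 'L' ∧
         orderlex l1 l2 (i + 1) (j + 1) = 0 then c1 + 1 else c1) c) 0

-- ===== PORT B =====
-- ''.join(w[(t+s) % n] for t in range(L)) — the length-L expansion of the s-th cyclic shift
def pvRotKey (l : List Char) (L s : Nat) : String :=
  String.ofList ((List.range L).map (fun t => l.getD ((t + s) % l.length) '?'))

-- [key(s) for s in range(n)]
def pvKeys (l : List Char) (L : Nat) : List String :=
  (List.range l.length).map (pvRotKey l L)

-- rank = {k: i for i, k in enumerate(allk)}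
def pvRank (allk : List String) : PySem.Dict String Int :=
  PySem.Dict.ofList ((PySem.List.enumerate allk).map (fun p => (p.2, p.1)))

def cross_word_alt (w1 : String) (w2 : String) : Int :=
  let l1 := w1.toList
  let l2 := w2.toList
  let n1 := l1.length
  let n2 := l2.length
  if n1 = 0 ∨ n2 = 0 then 0
  else
    let L := n1 + n2 + 2
    let keys1 := pvKeys l1 L
    let keys2 := pvKeys l2 L
    let allk := PySem.List.sorted (PySem.Set.ofList (keys1 ++ keys2)) (fun x => x) false
    let rank := pvRank allk
    -- rank[k]: the key is always present (k was put into the set), so getD is exact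
    let r1 := keys1.map (fun k => rank.getD k 0)
    let r2 := keys2.map (fun k => rank.getD k 0)
    (List.range n1).foldl (fun c i =>
      let a := r1.getD ((i + 1) % n1) 0
      (List.range n2).foldl (fun c j =>
        if l1.getD i '?' = 'L' then
          if l2.getD j '?' = 'R' ∧ r2.getD ((j + 1) % n2) 0 < a then c + 1 else c
        else if l1.getD i '?' = 'R' then
          if l2.getD j '?' = 'L' ∧ a < r2.getD ((j + 1) % n2) 0 then c + 1 else c
        else c) c) 0

-- ===== PRECONDITION & SPEC =====
def Spec_cross_word (w1 : String) (w2 : String) (out : Int) : Prop := out = cross_word_alt w1 w2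
instance (w1 : String) (w2 : String) (out : Int) : Decidable (Spec_cross_word w1 w2 out) := by unfold Spec_cross_word; infer_instance

-- ===== CLAIM (what is proved, stated in full; the proofs are below) =====
def Claim_equal_cross_word : Prop := ∀ (w1 : String) (w2 : String), Dom_cross_word w1 w2 → Spec_cross_word w1 w2 (cross_word w1 w2)

-- ===== LEMMAS AND PROOFS =====


-- olChar at natural-number arguments reads the rotated letter
lemma olChar_natCast (l : List Char) (a i : Nat) :
    olChar l (a : Int) i = l.getD ((i + a) % l.length) '?' := by
  unfold olChar
  have h : ((i : Int) + (a : Int)) = ((i + a : Nat) : Int) := by push_cast; ring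
  rw [h, PySem.Int.mod_natCast, PySem.List.pyGetD_natCast]

-- the while loop of orderlex: the final index is the first mismatch (or the hard bound)
lemma olLoop_spec (l1 l2 : List Char) (a b : Int) (i : Nat)
    (hi : i ≤ l1.length + l2.length + 1) :
    i ≤ olLoop l1 l2 a b i ∧ olLoop l1 l2 a b i ≤ l1.length + l2.length + 1 ∧
    (∀ t, i ≤ t → t < olLoop l1 l2 a b i → olChar l1 a t = olChar l2 b t) ∧
    (olChar l1 a (olLoop l1 l2 a b i) = olChar l2 b (olLoop l1 l2 a b i) →
      olLoop l1 l2 a b i = l1.length + l2.length + 1) := by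
  generalize hk : l1.length + l2.length + 1 - i = k
  induction k generalizing i with
  | zero =>
    have hneg : ¬ (olChar l1 a i = olChar l2 b i ∧ i ≤ l1.length + l2.length) := by
      intro hc; omega
    rw [olLoop, dif_neg hneg]
    exact ⟨le_refl _, hi, fun t ht htr => absurd htr (by omega), fun _ => by omega⟩
  | succ k ih =>
    by_cases h : olChar l1 a i = olChar l2 b i ∧ i ≤ l1.length + l2.length
    · rw [olLoop, dif_pos h]
      obtain ⟨h1, h2, h3, h4⟩ := ih (i + 1) (by omega) (by omega)
      refine ⟨by omega, h2, ?_, h4⟩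
      intro t ht htr
      rcases Nat.eq_or_lt_of_le ht with rfl | ht'
      · exact h.1
      · exact h3 t ht' htr
    · rw [olLoop, dif_neg h]
      refine ⟨le_refl _, hi, fun t ht htr => absurd htr (by omega), fun hEq => ?_⟩
      have hgt : ¬ i ≤ l1.length + l2.length := fun hb => h ⟨hEq, hb⟩
      omega

-- the t-th letter of a rotation key
lemma rotKey_getD (l : List Char) (L s t : Nat) (ht : t < L) :
    (pvRotKey l L s).toList.getD t '?' = l.getD ((t + s) % l.length) '?' := by
  unfold pvRotKey
  rw [String.toList_ofList]
  rw [List.getD_eq_getElem _ _ (by simpa using ht)]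
  simp

lemma rotKey_length (l : List Char) (L s : Nat) : (pvRotKey l L s).toList.length = L := by
  unfold pvRotKey; rw [String.toList_ofList]; simp

-- a first strict mismatch after an equal prefix makes the list lexicographically smaller
lemma lt_of_firstDiff (m : Nat) : ∀ (xs ys : List Char), m < xs.length → m < ys.length →
    (∀ t, t < m → xs.getD t '?' = ys.getD t '?') →
    xs.getD m '?' < ys.getD m '?' → xs < ys := by
  induction m with
  | zero =>
    intro xs ys hx hy _ hm
    match xs, ys with
    | x :: xs', y :: ys' =>
      exact List.cons_lt_cons_iff.mpr (Or.inl (by simpa using hm))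
  | succ m ih =>
    intro xs ys hx hy hpre hm
    match xs, ys with
    | x :: xs', y :: ys' =>
      have hxy : x = y := by simpa using hpre 0 (Nat.succ_pos m)
      refine List.cons_lt_cons_iff.mpr (Or.inr ⟨hxy, ih xs' ys' (by simpa using hx)
        (by simpa using hy) ?_ (by simpa using hm)⟩)
      intro t ht
      simpa using hpre (t + 1) (by omega)

-- lists that agree letterwise are equal
lemma eq_of_allEq (xs ys : List Char) (hlen : xs.length = ys.length)
    (h : ∀ t, t < xs.length → xs.getD t '?' = ys.getD t '?') : xs = ys := by
  refine List.ext_getElem hlen (fun i h1 h2 => ?_)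
  have := h i h1
  rwa [List.getD_eq_getElem _ _ h1, List.getD_eq_getElem _ _ h2] at this

-- orderlex computes the string comparison of the two expanded rotation keys
lemma orderlex_eq_keyCompare (l1 l2 : List Char) (a b : Nat) :
    orderlex l1 l2 (a : Int) (b : Int) =
      (if pvRotKey l1 (l1.length + l2.length + 2) (a % l1.length) <
          pvRotKey l2 (l1.length + l2.length + 2) (b % l2.length) then 0
       else if pvRotKey l2 (l1.length + l2.length + 2) (b % l2.length) <
          pvRotKey l1 (l1.length + l2.length + 2) (a % l1.length) then 1
       else 2) := by
  set n1 := l1.length with hn1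
  set n2 := l2.length with hn2
  set L := n1 + n2 + 2 with hL
  set K1 := pvRotKey l1 L (a % n1) with hK1
  set K2 := pvRotKey l2 L (b % n2) with hK2
  set m := olLoop l1 l2 (a : Int) (b : Int) 0 with hm
  obtain ⟨-, hub, hpre, hlast⟩ := olLoop_spec l1 l2 (a : Int) (b : Int) 0 (by omega)
  -- the key letters are the loop letters
  have hkey1 : ∀ t, t < L → K1.toList.getD t '?' = olChar l1 (a : Int) t := by
    intro t ht
    rw [hK1, rotKey_getD l1 L _ t ht, olChar_natCast, Nat.add_mod_mod t a l1.length]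
  have hkey2 : ∀ t, t < L → K2.toList.getD t '?' = olChar l2 (b : Int) t := by
    intro t ht
    rw [hK2, rotKey_getD l2 L _ t ht, olChar_natCast, Nat.add_mod_mod t b l2.length]
  have hmL : m < L := by omega
  have hpre' : ∀ t, t < m → K1.toList.getD t '?' = K2.toList.getD t '?' := by
    intro t ht
    rw [hkey1 t (by omega), hkey2 t (by omega)]
    exact hpre t (Nat.zero_le t) ht
  have hlen1 : K1.toList.length = L := rotKey_length _ _ _
  have hlen2 : K2.toList.length = L := rotKey_length _ _ _
  show (if olChar l1 (a : Int) m < olChar l2 (b : Int) m then 0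
        else if olChar l2 (b : Int) m < olChar l1 (a : Int) m then 1 else 2 : Int) = _
  rcases lt_trichotomy (olChar l1 (a : Int) m) (olChar l2 (b : Int) m) with hc | hc | hc
  · -- K1 < K2
    have hKK : K1 < K2 := by
      rw [String.lt_iff_toList_lt]
      exact lt_of_firstDiff m _ _ (by omega) (by omega) hpre'
        (by rw [hkey1 m hmL, hkey2 m hmL]; exact hc)
    rw [if_pos hc, if_pos hKK]
  · -- keys equal
    have hmN : m = n1 + n2 + 1 := hlast hc
    have hEq : K1 = K2 := by
      apply String.toList_inj.mp
      refine eq_of_allEq _ _ (by omega) (fun t ht => ?_)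
      rw [hkey1 t (by omega), hkey2 t (by omega)]
      rcases Nat.lt_or_ge t m with ht' | ht'
      · exact hpre t (Nat.zero_le t) ht'
      · have : t = m := by omega
        rw [this]; exact hc
    have hnc1 : ¬ olChar l1 (a : Int) m < olChar l2 (b : Int) m := by
      rw [hc]; exact lt_irrefl _
    have hnc2 : ¬ olChar l2 (b : Int) m < olChar l1 (a : Int) m := by
      rw [hc]; exact lt_irrefl _
    have hnk1 : ¬ K1 < K2 := by rw [hEq]; exact lt_irrefl _
    have hnk2 : ¬ K2 < K1 := by rw [hEq]; exact lt_irrefl _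
    rw [if_neg hnc1, if_neg hnc2, if_neg hnk1, if_neg hnk2]
  · -- K2 < K1
    have hKK : K2 < K1 := by
      rw [String.lt_iff_toList_lt]
      exact lt_of_firstDiff m _ _ (by omega) (by omega)
        (fun t ht => (hpre' t ht).symm) (by rw [hkey1 m hmL, hkey2 m hmL]; exact hc)
    rw [if_neg (not_lt_of_gt hc), if_pos hc, if_neg (not_lt_of_gt hKK), if_pos hKK]

-- the rank dictionary sends the idx-th element of allk to idx
lemma pvRank_getD (allk : List String) (hnd : allk.Nodup) (idx : Nat) (h : idx < allk.length) :
    (pvRank allk).getD (allk[idx]) 0 = (idx : Int) := by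
  have hpairs : ((PySem.List.enumerate allk).map (fun p => (p.2, p.1))).map Prod.fst = allk := by
    rw [List.map_map]
    exact PySem.List.map_snd_enumerate allk 0
  have hitems : (pvRank allk).items = (PySem.List.enumerate allk).map (fun p => (p.2, p.1)) := by
    unfold pvRank
    have := PySem.Dict.items_foldl_insert_fresh
      ((PySem.List.enumerate allk).map (fun p => (p.2, p.1))) Prod.fst Prod.snd PySem.Dict.empty
      (fun a _ => by simp [PySem.Dict.contains_empty]) (by rw [hpairs]; exact hnd)
    simpa [PySem.Dict.ofList] using this
  have hmem : ((allk[idx] : String), (idx : Int)) ∈ (pvRank allk).items := by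
    rw [hitems]
    refine List.mem_map.mpr ⟨((idx : Int), allk[idx]), ?_, rfl⟩
    exact (PySem.List.mem_enumerate_iff allk 0 _).mpr ⟨idx, h, by simp⟩
  exact PySem.Dict.getD_of_mem_items _ hmem (by
    have := PySem.Dict.nodup_keys_ofList (κ := String) (ν := Int)
      ((PySem.List.enumerate allk).map (fun p => (p.2, p.1)))
    exact this) 0

-- on a strictly sorted list, rank order is string order
lemma rank_lt_iff (allk : List String) (hPW : allk.Pairwise (· < ·))
    (k1 k2 : String) (m1 : k1 ∈ allk) (m2 : k2 ∈ allk) :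
    ((pvRank allk).getD k1 0 < (pvRank allk).getD k2 0) ↔ k1 < k2 := by
  have hnd : allk.Nodup := hPW.imp ne_of_lt
  obtain ⟨p, hp, hpe⟩ := List.mem_iff_getElem.mp m1
  obtain ⟨q, hq, hqe⟩ := List.mem_iff_getElem.mp m2
  rw [← hpe, ← hqe, pvRank_getD allk hnd p hp, pvRank_getD allk hnd q hq]
  constructor
  · intro hlt
    exact List.pairwise_iff_getElem.mp hPW p q hp hq (by exact_mod_cast hlt)
  · intro hlt
    by_contra hge
    have hqp : q ≤ p := by exact_mod_cast not_lt.mp hge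
    rcases Nat.lt_or_ge q p with hq' | hq'
    · exact absurd hlt (not_lt_of_gt (List.pairwise_iff_getElem.mp hPW q p hq hp hq'))
    · have : p = q := by omega
      subst this
      exact lt_irrefl _ hlt


-- looking up the i-th rank in the mapped rank list
lemma rmap_getD (l : List Char) (L : Nat) (rank : PySem.Dict String Int) (s : Nat)
    (hs : s < l.length) :
    ((pvKeys l L).map (fun k => rank.getD k 0)).getD s 0 = rank.getD (pvRotKey l L s) 0 := by
  have hlen : ((pvKeys l L).map (fun k => rank.getD k 0)).length = l.length := by
    simp [pvKeys]
  rw [List.getD_eq_getElem _ _ (by rw [hlen]; exact hs)]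
  simp [pvKeys]

lemma rotKey_mem_keys (l : List Char) (L s : Nat) (hs : s < l.length) :
    pvRotKey l L s ∈ pvKeys l L := by
  unfold pvKeys
  exact List.mem_map.mpr ⟨s, List.mem_range.mpr hs, rfl⟩

-- the per-pair comparison: A's orderlex result versus B's rank comparison
lemma orderlex_rank (l1 l2 : List Char) (h1 : l1 ≠ []) (h2 : l2 ≠ []) (i j : Nat)
    (hi : i < l1.length) (hj : j < l2.length) :
    ((orderlex l1 l2 ((i : Int) + 1) ((j : Int) + 1) = 1) ↔
      ((pvKeys l2 (l1.length + l2.length + 2)).map (fun k =>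
          (pvRank (PySem.List.sorted (PySem.Set.ofList
            (pvKeys l1 (l1.length + l2.length + 2) ++ pvKeys l2 (l1.length + l2.length + 2)))
            (fun x => x) false)).getD k 0)).getD ((j + 1) % l2.length) 0 <
      ((pvKeys l1 (l1.length + l2.length + 2)).map (fun k =>
          (pvRank (PySem.List.sorted (PySem.Set.ofList
            (pvKeys l1 (l1.length + l2.length + 2) ++ pvKeys l2 (l1.length + l2.length + 2)))
            (fun x => x) false)).getD k 0)).getD ((i + 1) % l1.length) 0) ∧
    ((orderlex l1 l2 ((i : Int) + 1) ((j : Int) + 1) = 0) ↔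
      ((pvKeys l1 (l1.length + l2.length + 2)).map (fun k =>
          (pvRank (PySem.List.sorted (PySem.Set.ofList
            (pvKeys l1 (l1.length + l2.length + 2) ++ pvKeys l2 (l1.length + l2.length + 2)))
            (fun x => x) false)).getD k 0)).getD ((i + 1) % l1.length) 0 <
      ((pvKeys l2 (l1.length + l2.length + 2)).map (fun k =>
          (pvRank (PySem.List.sorted (PySem.Set.ofList
            (pvKeys l1 (l1.length + l2.length + 2) ++ pvKeys l2 (l1.length + l2.length + 2)))
            (fun x => x) false)).getD k 0)).getD ((j + 1) % l2.length) 0) := by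
  set n1 := l1.length with hn1
  set n2 := l2.length with hn2
  set L := n1 + n2 + 2 with hL
  set AK := PySem.List.sorted (PySem.Set.ofList (pvKeys l1 L ++ pvKeys l2 L))
    (fun x => x) false with hAK
  set K1 := pvRotKey l1 L ((i + 1) % n1) with hK1
  set K2 := pvRotKey l2 L ((j + 1) % n2) with hK2
  have hn1pos : 0 < n1 := List.length_pos_iff.mpr h1
  have hn2pos : 0 < n2 := List.length_pos_iff.mpr h2
  have hPW : AK.Pairwise (· < ·) := PySem.List.sorted_ofList_pairwise_lt _
  have hmem1 : K1 ∈ AK := by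
    rw [hAK, PySem.List.mem_sorted, PySem.Set.mem_ofList]
    exact List.mem_append_left _ (rotKey_mem_keys l1 L _ (Nat.mod_lt _ hn1pos))
  have hmem2 : K2 ∈ AK := by
    rw [hAK, PySem.List.mem_sorted, PySem.Set.mem_ofList]
    exact List.mem_append_right _ (rotKey_mem_keys l2 L _ (Nat.mod_lt _ hn2pos))
  rw [rmap_getD l1 L _ _ (Nat.mod_lt _ hn1pos), rmap_getD l2 L _ _ (Nat.mod_lt _ hn2pos)]
  have hcast : ((i : Int) + 1) = ((i + 1 : Nat) : Int) := by push_cast; ring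
  have hcast' : ((j : Int) + 1) = ((j + 1 : Nat) : Int) := by push_cast; ring
  rw [hcast, hcast', orderlex_eq_keyCompare l1 l2 (i + 1) (j + 1)]
  have hr12 : ((pvRank AK).getD K1 0 < (pvRank AK).getD K2 0) ↔ K1 < K2 :=
    rank_lt_iff AK hPW K1 K2 hmem1 hmem2
  have hr21 : ((pvRank AK).getD K2 0 < (pvRank AK).getD K1 0) ↔ K2 < K1 :=
    rank_lt_iff AK hPW K2 K1 hmem2 hmem1
  rw [hr12, hr21]
  constructor
  · by_cases hA : K1 < K2
    · rw [if_pos hA]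
      simp [lt_asymm hA]
    · rw [if_neg hA]
      by_cases hB : K2 < K1
      · rw [if_pos hB]; simp [hB]
      · rw [if_neg hB]; norm_num [hB]
  · by_cases hA : K1 < K2
    · rw [if_pos hA]; simp [hA]
    · rw [if_neg hA]
      by_cases hB : K2 < K1
      · rw [if_pos hB]; norm_num [hA]
      · rw [if_neg hB]; norm_num [hA]

-- the two programs agree
-- reshaping A's two sequential updates into B's branch tree
lemma ifshape (PL PR QL QR X Y : Prop) [Decidable PL] [Decidable PR] [Decidable QL]
    [Decidable QR] [Decidable X] [Decidable Y] (hLR : ¬(PL ∧ PR)) (c : Int) :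
    (if PR ∧ QL ∧ Y then (if PL ∧ QR ∧ X then c + 1 else c) + 1
     else (if PL ∧ QR ∧ X then c + 1 else c))
    = (if PL then if QR ∧ X then c + 1 else c
       else if PR then if QL ∧ Y then c + 1 else c else c) := by
  split_ifs <;> first | omega | tauto

lemma cross_word_eq (w1 w2 : String) : cross_word w1 w2 = cross_word_alt w1 w2 := by
  unfold cross_word cross_word_alt
  dsimp only
  by_cases h1 : w1.toList = []
  · rw [h1]
    rw [if_pos (Or.inl (by simp))]
    simp [PySem.List.pyRange_one_eq_nil (le_refl 0)]
  by_cases h2 : w2.toList = []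
  · rw [h2]
    rw [if_pos (Or.inr (by simp))]
    simp [PySem.List.pyRange_one_eq_nil (le_refl 0), List.foldl_fixed]
  rw [if_neg (by
    push_neg
    exact ⟨fun h => h1 (List.length_eq_zero_iff.mp h),
           fun h => h2 (List.length_eq_zero_iff.mp h)⟩)]
  rw [PySem.List.pyRange_zero_natCast w1.toList.length, List.foldl_map]
  refine PySem.List.foldl_congr_mem _ _ _ _ (fun c i hi => ?_)
  rw [PySem.List.pyRange_zero_natCast w2.toList.length, List.foldl_map]
  refine PySem.List.foldl_congr_mem _ _ _ _ (fun c' j hj => ?_)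
  have hi' : i < w1.toList.length := List.mem_range.mp hi
  have hj' : j < w2.toList.length := List.mem_range.mp hj
  obtain ⟨e1, e0⟩ := orderlex_rank w1.toList w2.toList h1 h2 i j hi' hj'
  simp only [PySem.List.pyGetD_natCast]
  simp only [e1, e0]
  exact ifshape _ _ _ _ _ _
    (by rintro ⟨hL, hR⟩; rw [hL] at hR; exact absurd hR (by decide)) c'

-- ===== VERDICT (by name: the statement is the Claim_ definition above) =====
theorem cross_word_spec : Claim_equal_cross_word := by
  intro w1 w2 _
  unfold Spec_cross_word
  exact cross_word_eq w1 w2
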